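-- pv_equiv track=rewrite | github.com/masonc08/algs | algorithms/sum_number_strings.py | sum_number_strings
-- ===== SOURCE A (Python) =====
-- def sum_number_strings(a: str, b: str) -> str:
--     lstr = max(a, b, key=len)
--     sstr = a if lstr is b else b
--     sol = list(lstr[:len(lstr)-len(sstr)])
--     i = len(lstr)-len(sstr)
--     j = 0
--     while i < len(lstr) and j < len(sstr):
--         a, b = int(lstr[i]), int(sstr[j])
--         sol.append(str(a+b))
--         i += 1
--         j += 1
--     return ''.join(sol)
-- ===== SOURCE B (Python) =====
-- def sum_number_strings(a: str, b: str) -> str: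
--     # Single right-to-left merge of the two reversed strings; no prefix slice,
--     # no index bookkeeping against the longer string.
--     ra, rb = a[::-1], b[::-1]
--     chunks = []
--     for i in range(max(len(ra), len(rb))):
--         if i >= len(rb):
--             chunks.append(ra[i])
--         elif i >= len(ra):
--             chunks.append(rb[i])
--         else:
--             chunks.append(str(int(ra[i]) + int(rb[i])))
--     return ''.join(reversed(chunks))
-- ===== Notes on version B (the rewrite author's own statement) =====
-- stated objective: idiomatic
-- what changed: A slices off the unmatched prefix of the longer string and then walks the aligned suffixes with two indices in a while loop; B makes a single right-to-left merge over the two reversed strings (lone leftover chars copied, pairs summed) and reverses the chunk list, with no prefix slice and no longer/shorter bookkeeping.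
import Mathlib
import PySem

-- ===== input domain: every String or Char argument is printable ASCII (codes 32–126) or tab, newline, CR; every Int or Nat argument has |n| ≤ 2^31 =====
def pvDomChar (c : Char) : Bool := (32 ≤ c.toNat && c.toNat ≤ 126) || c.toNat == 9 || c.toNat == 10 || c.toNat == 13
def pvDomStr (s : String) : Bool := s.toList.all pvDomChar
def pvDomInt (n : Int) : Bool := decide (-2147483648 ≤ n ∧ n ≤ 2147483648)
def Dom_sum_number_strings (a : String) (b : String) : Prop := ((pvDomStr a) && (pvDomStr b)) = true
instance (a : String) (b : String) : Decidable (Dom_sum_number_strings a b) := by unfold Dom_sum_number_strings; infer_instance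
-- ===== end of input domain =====

-- B replaces A's prefix-slice-plus-indexed-while decomposition with one right-to-left
-- merge of the two reversed strings (idiomatic; same cost).


-- ===== PORT A =====
-- str(int(x) + int(y)) for single chars x y; (c.toNat : Int) - 48 = int(c), exact for
-- digit chars — Pre_ restricts the summed positions to digits (elsewhere Python raises).
def pvSumChunk (c d : Char) : List Char :=
  PySem.Int.toChars (((c.toNat : Int) - 48) + ((d.toNat : Int) - 48))

-- the while loop of A: i over lstr, j over sstr, appending str(int(lstr[i])+int(sstr[j]))
def pvALoop (L S : List Char) (i j : Nat) (sol : List (List Char)) : List (List Char) :=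
  if h : i < L.length ∧ j < S.length then
    pvALoop L S (i + 1) (j + 1) (sol ++ [pvSumChunk L[i] S[j]])
  else sol
termination_by L.length - i

def sum_number_strings (a : String) (b : String) : String :=
  -- max(a, b, key=len) returns a on a length tie (first maximal)
  let lstr := if a.toList.length < b.toList.length then b else a
  let sstr := if a.toList.length < b.toList.length then a else b
  let L := lstr.toList
  let S := sstr.toList
  let k := L.length - S.length          -- len(lstr) - len(sstr) ≥ 0
  -- sol = list(lstr[:k]): the slice [:k] with 0 ≤ k ≤ len is List.take k, exact
  let sol := (L.take k).map (fun c => [c])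
  String.ofList (pvALoop L S k 0 sol).flatten   -- ''.join(sol)

-- ===== PORT B =====
-- the merge loop of Source B: position i runs over the reversed strings; a lone leftover
-- char is kept unchanged, a pair becomes str(int(x)+int(y))
def pvBMerge : List Char → List Char → List (List Char)
  | [], [] => []
  | x :: xs, [] => [x] :: pvBMerge xs []
  | [], y :: ys => [y] :: pvBMerge [] ys
  | x :: xs, y :: ys => pvSumChunk x y :: pvBMerge xs ys

def sum_number_strings_alt (a : String) (b : String) : String :=
  String.ofList ((pvBMerge a.toList.reverse b.toList.reverse).reverse).flatten

-- ===== PRECONDITION & SPEC =====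
-- A raises ValueError (int(c) on a non-digit) unless the overlapping suffixes — the last
-- min(len a, len b) characters of each string — consist of digits; Pre_ is exactly that.
def Pre_sum_number_strings (a : String) (b : String) : Prop :=
  ((a.toList.drop (a.toList.length - min a.toList.length b.toList.length)).all Char.isDigit &&
   (b.toList.drop (b.toList.length - min a.toList.length b.toList.length)).all Char.isDigit) = true
instance (a : String) (b : String) : Decidable (Pre_sum_number_strings a b) := by
  unfold Pre_sum_number_strings; infer_instance

def pvWitness_sum_number_strings : String × String := ("ab123", "45")

def Spec_sum_number_strings (a : String) (b : String) (out : String) : Prop := out = sum_number_strings_alt a b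
instance (a : String) (b : String) (out : String) : Decidable (Spec_sum_number_strings a b out) := by unfold Spec_sum_number_strings; infer_instance

-- ===== CLAIM (what is proved, stated in full; the proofs are below) =====
def Claim_equal_sum_number_strings : Prop := ∀ (a : String) (b : String), Dom_sum_number_strings a b → Pre_sum_number_strings a b → Spec_sum_number_strings a b (sum_number_strings a b)

-- ===== LEMMAS AND PROOFS =====

-- A's while loop appends exactly the pairwise sums of the remaining suffixes.
theorem pvALoop_eq (L S : List Char) :
    ∀ n i j sol, L.length - i ≤ n →
      pvALoop L S i j sol = sol ++ List.zipWith pvSumChunk (L.drop i) (S.drop j) := by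
  intro n
  induction n with
  | zero =>
    intro i j sol hn
    rw [pvALoop]
    have hi : L.length ≤ i := by omega
    simp [Nat.not_lt.mpr hi, List.drop_eq_nil_of_le hi]
  | succ n ih =>
    intro i j sol hn
    rw [pvALoop]
    by_cases h : i < L.length ∧ j < S.length
    · rw [dif_pos h, ih (i + 1) (j + 1) _ (by omega),
        List.drop_eq_getElem_cons h.1, List.drop_eq_getElem_cons h.2]
      simp only [List.zipWith_cons_cons, List.append_assoc, List.singleton_append]
    · rw [dif_neg h]
      rcases Nat.lt_or_ge i L.length with hi | hi
      · have hj : S.length ≤ j := by omega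
        simp [List.drop_eq_nil_of_le hj]
      · simp [List.drop_eq_nil_of_le hi]

theorem pvSumChunk_comm (c d : Char) : pvSumChunk c d = pvSumChunk d c := by
  unfold pvSumChunk; rw [Int.add_comm]

theorem pvBMerge_nil_right (xs : List Char) :
    pvBMerge xs [] = xs.map (fun c => [c]) := by
  induction xs with
  | nil => simp [pvBMerge]
  | cons x xs ih => simp [pvBMerge, ih]

theorem pvBMerge_nil_left (ys : List Char) :
    pvBMerge [] ys = ys.map (fun c => [c]) := by
  induction ys with
  | nil => simp [pvBMerge]
  | cons y ys ih => simp [pvBMerge, ih]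

theorem pvBMerge_comm (xs : List Char) : ∀ ys, pvBMerge xs ys = pvBMerge ys xs := by
  induction xs with
  | nil => intro ys; cases ys <;> simp [pvBMerge_nil_right, pvBMerge_nil_left]
  | cons x xs ih =>
    intro ys
    cases ys with
    | nil => simp [pvBMerge_nil_right, pvBMerge_nil_left]
    | cons y ys => rw [pvBMerge, pvBMerge, ih, pvSumChunk_comm]

theorem pvBMerge_spec : ∀ (ys xs : List Char), ys.length ≤ xs.length →
    pvBMerge xs ys =
      List.zipWith pvSumChunk (xs.take ys.length) ys ++ (xs.drop ys.length).map (fun c => [c]) := by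
  intro ys
  induction ys with
  | nil => intro xs _; simp [pvBMerge_nil_right]
  | cons y ys ih =>
    intro xs hlen
    cases xs with
    | nil => simp at hlen
    | cons x xs =>
      rw [pvBMerge, ih xs (by simpa using hlen)]
      simp

-- B's reversed merge of the reversed inputs, when S is the shorter list, is exactly
-- A's prefix followed by the suffix-aligned pairwise sums.
theorem pvBMerge_rev (L S : List Char) (hS : S.length ≤ L.length) :
    (pvBMerge L.reverse S.reverse).reverse =
      (L.take (L.length - S.length)).map (fun c => [c]) ++
        List.zipWith pvSumChunk (L.drop (L.length - S.length)) S := by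
  rw [pvBMerge_spec S.reverse L.reverse (by simpa using hS)]
  have hlen : (L.reverse.take S.reverse.length).length = S.reverse.length := by
    simp; omega
  rw [List.reverse_append, List.reverse_zipWith hlen, List.reverse_reverse,
    ← List.map_reverse, List.length_reverse, List.drop_reverse, List.take_reverse,
    List.reverse_reverse, List.reverse_reverse]

-- ===== VERDICT (by name: the statement is the Claim_ definition above) =====
theorem sum_number_strings_spec : Claim_equal_sum_number_strings := by
  intro a b _ _
  unfold Spec_sum_number_strings sum_number_strings sum_number_strings_alt
  by_cases hab : a.toList.length < b.toList.length
  · simp only [if_pos hab]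
    rw [pvALoop_eq b.toList a.toList (b.toList.length) _ _ _ (by omega),
      pvBMerge_comm, pvBMerge_rev b.toList a.toList (by omega)]
    simp
  · simp only [if_neg hab]
    rw [pvALoop_eq a.toList b.toList (a.toList.length) _ _ _ (by omega),
      pvBMerge_rev a.toList b.toList (by omega)]
    simp
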